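-- pv_equiv track=rewrite | github.com/bbi-lab/variant-annotation | src/add_vcf_identifiers.py | _extract_chromosome_from_hgvs
-- ===== SOURCE A (Python) =====
-- from typing import Optional
--
-- _ACCESSION_TO_CHROMOSOME = {
--     "NC_000001": "1", "NC_000002": "2", "NC_000003": "3", "NC_000004": "4",
--     "NC_000005": "5", "NC_000006": "6", "NC_000007": "7", "NC_000008": "8",
--     "NC_000009": "9", "NC_000010": "10", "NC_000011": "11", "NC_000012": "12",
--     "NC_000013": "13", "NC_000014": "14", "NC_000015": "15", "NC_000016": "16",
--     "NC_000017": "17", "NC_000018": "18", "NC_000019": "19", "NC_000020": "20",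
--     "NC_000021": "21", "NC_000022": "22", "NC_000023": "X", "NC_000024": "Y",
--     "NC_012920": "M",  # Mitochondrial genome
-- }
--
-- def _is_blank(value: Optional[str]) -> bool:
--     return value is None or not value.strip()
--
-- def _extract_chromosome_from_hgvs(hgvs_value: Optional[str]) -> Optional[str]:
--     """Extract chromosome number from HGVS accession code.
--
--     Examples:
--     - "NC_000001.11:g..." -> "1"
--     - "NC_000023.11:g..." -> "X"
--     - "NC_012920.1:m..." -> "M"
--     """
--     if _is_blank(hgvs_value):
--         return None
--
--     text = (hgvs_value or "").strip()
--     if ":" not in text: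
--         return None
--
--     accession, _ = text.split(":", 1)
--     accession = accession.strip()
--
--     # Try to match known RefSeq prefixes
--     for prefix, chromosome in _ACCESSION_TO_CHROMOSOME.items():
--         if accession.startswith(prefix):
--             return chromosome
--
--     return None
-- ===== SOURCE B (Python) =====
-- from typing import Optional
--
--
-- def _is_blank(value: Optional[str]) -> bool:
--     return value is None or not value.strip()
--
--
-- def _decode_accession(head: str) -> Optional[str]:
--     # Arithmetic decoding of the RefSeq chromosome accessions: no table at all.
--     # "NC_012920" is the mitochondrial genome; "NC_0000NN" encodes chromosome
--     # NN (01..22 autosomes, 23 = X, 24 = Y).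
--     if head == "NC_012920":
--         return "M"
--     if len(head) == 9 and head.startswith("NC_0000") and head[7:].isdigit():
--         n = 10 * (ord(head[7]) - 48) + (ord(head[8]) - 48)
--         if 1 <= n <= 22:
--             return str(n)
--         if n == 23:
--             return "X"
--         if n == 24:
--             return "Y"
--     return None
--
--
-- def _extract_chromosome_from_hgvs(hgvs_value: Optional[str]) -> Optional[str]:
--     if _is_blank(hgvs_value):
--         return None
--     text = (hgvs_value or "").strip()
--     if ":" not in text:
--         return None
--     accession = text.split(":", 1)[0].strip()
--     return _decode_accession(accession[:9])
-- ===== Notes on version B (the rewrite author's own statement) =====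
-- stated objective: alternative
-- what changed: Drops the 25-entry prefix table and its startswith scan entirely: B decodes the fixed-width 9-character accession head arithmetically (exact match for NC_012920 -> M, and for NC_0000NN computes NN from the two digit characters, mapping 1..22 to str(n), 23 to X, 24 to Y).
import Mathlib
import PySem

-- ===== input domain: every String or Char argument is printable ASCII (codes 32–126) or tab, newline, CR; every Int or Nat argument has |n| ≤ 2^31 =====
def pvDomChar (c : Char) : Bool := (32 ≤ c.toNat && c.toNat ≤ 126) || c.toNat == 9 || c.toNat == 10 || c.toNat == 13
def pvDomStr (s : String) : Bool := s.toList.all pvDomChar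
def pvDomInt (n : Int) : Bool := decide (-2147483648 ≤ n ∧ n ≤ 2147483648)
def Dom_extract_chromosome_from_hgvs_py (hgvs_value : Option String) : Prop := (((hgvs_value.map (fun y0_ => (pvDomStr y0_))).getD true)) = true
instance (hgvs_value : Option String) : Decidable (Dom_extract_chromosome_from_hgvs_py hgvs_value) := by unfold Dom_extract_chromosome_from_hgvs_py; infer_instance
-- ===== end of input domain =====

-- B drops A's 25-entry prefix table and its startswith scan: it decodes the 9-character
-- accession head arithmetically ("NC_012920" -> "M", "NC_0000NN" -> chromosome NN with
-- 23 = X, 24 = Y).  Alternative algorithm, same cost class.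

-- module-level helper _is_blank, shared by both Pythons
def pvIsBlank (value : Option String) : Bool :=
  match value with
  | none => true
  | some s => PySem.Str.strip s == ""

-- ===== PORT A =====
-- A's module-level table _ACCESSION_TO_CHROMOSOME
def pvTable : List (String × String) :=
  [("NC_000001", "1"), ("NC_000002", "2"), ("NC_000003", "3"), ("NC_000004", "4"),
   ("NC_000005", "5"), ("NC_000006", "6"), ("NC_000007", "7"), ("NC_000008", "8"),
   ("NC_000009", "9"), ("NC_000010", "10"), ("NC_000011", "11"), ("NC_000012", "12"),
   ("NC_000013", "13"), ("NC_000014", "14"), ("NC_000015", "15"), ("NC_000016", "16"),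
   ("NC_000017", "17"), ("NC_000018", "18"), ("NC_000019", "19"), ("NC_000020", "20"),
   ("NC_000021", "21"), ("NC_000022", "22"), ("NC_000023", "X"), ("NC_000024", "Y"),
   ("NC_012920", "M")]

-- the 'for prefix, chromosome in …: if accession.startswith(prefix): return chromosome' loop
def pvPrefixLoop : List (String × String) → String → Option String
  | [], _ => none
  | (pfx, chromosome) :: rest, accession =>
    if PySem.Str.startswith accession pfx then some chromosome
    else pvPrefixLoop rest accession

def extract_chromosome_from_hgvs_py (hgvs_value : Option String) : Option String :=
  if pvIsBlank hgvs_value then none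
  else
    let text := PySem.Str.strip (hgvs_value.getD "")
    if !(PySem.Str.isIn ":" text) then none
    else
      -- 'accession, _ = text.split(":", 1)': ':' is in text, so the split has two parts; take the first
      let accession := PySem.Str.strip (((PySem.Str.splitMax? text ":" 1).getD []).headD "")
      pvPrefixLoop pvTable accession

-- ===== PORT B =====
-- B's helper _decode_accession: arithmetic decoding, no table
def pvDecodeAccession (head : String) : Option String :=
  if head == "NC_012920" then some "M"
  else if PySem.Str.len head == 9 && PySem.Str.startswith head "NC_0000"
          && PySem.Str.strIsdigit (PySem.Str.slice head (some 7) none) then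
    -- head[7] / head[8] are in range here (len(head) == 9), so the getD default is unreachable
    let n : Int := 10 * (((PySem.Str.pyGet? head 7).getD ' ').toNat - 48)
                   + (((PySem.Str.pyGet? head 8).getD ' ').toNat - 48)
    if 1 ≤ n ∧ n ≤ 22 then some (PySem.Int.toStr n)
    else if n == 23 then some "X"
    else if n == 24 then some "Y"
    else none
  else none

def extract_chromosome_from_hgvs_py_alt (hgvs_value : Option String) : Option String :=
  if pvIsBlank hgvs_value then none
  else
    let text := PySem.Str.strip (hgvs_value.getD "")
    if !(PySem.Str.isIn ":" text) then none
    else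
      let accession := PySem.Str.strip (((PySem.Str.splitMax? text ":" 1).getD []).headD "")
      pvDecodeAccession (PySem.Str.slice accession none (some 9))

-- ===== PRECONDITION & SPEC =====
def Spec_extract_chromosome_from_hgvs_py (hgvs_value : Option String) (out : Option String) : Prop := out = extract_chromosome_from_hgvs_py_alt hgvs_value
instance (hgvs_value : Option String) (out : Option String) : Decidable (Spec_extract_chromosome_from_hgvs_py hgvs_value out) := by unfold Spec_extract_chromosome_from_hgvs_py; infer_instance

-- ===== CLAIM (what is proved, stated in full; the proofs are below) =====
def Claim_equal_extract_chromosome_from_hgvs_py : Prop := ∀ (hgvs_value : Option String), Dom_extract_chromosome_from_hgvs_py hgvs_value → Spec_extract_chromosome_from_hgvs_py hgvs_value (extract_chromosome_from_hgvs_py hgvs_value)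

-- ===== LEMMAS AND PROOFS =====

-- A's scan, rewritten with the startswith tests replaced by equality with the 9-char head
def pvLookup9 : List (String × String) → String → Option String
  | [], _ => none
  | (p, c) :: rest, head => if p == head then some c else pvLookup9 rest head

-- startswith by a 9-character prefix is equality with the 9-character slice
theorem pv_startswith_eq_slice (acc p : String) (hp : p.toList.length = 9) :
    PySem.Str.startswith acc p = (p == PySem.Str.slice acc none (some 9)) := by
  have ht : (PySem.Str.slice acc none (some 9)).toList = acc.toList.take 9 := by
    simp [PySem.Str.toList_slice, PySem.List.slice_to acc.toList (by norm_num : (0:Int) ≤ 9)]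
  rw [Bool.eq_iff_iff]
  constructor
  · intro h
    have hpre : p.toList <+: acc.toList := by
      have := PySem.Str.startswith_eq acc p
      rw [this] at h
      exact (PySem.Chars.startswith_iff _ _).mp h
    have := List.prefix_iff_eq_take.mp hpre
    rw [beq_iff_eq]
    apply String.toList_injective
    rw [ht, ← hp, ← this]
  · intro h
    rw [beq_iff_eq] at h
    rw [PySem.Str.startswith_eq]
    apply (PySem.Chars.startswith_iff _ _).mpr
    apply List.prefix_iff_eq_take.mpr
    rw [hp, ← ht, h]

theorem pv_loop_eq_lookup (acc : String) (l : List (String × String))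
    (h : ∀ q ∈ l, q.1.toList.length = 9) :
    pvPrefixLoop l acc = pvLookup9 l (PySem.Str.slice acc none (some 9)) := by
  induction l with
  | nil => rfl
  | cons q rest ih =>
    obtain ⟨p, c⟩ := q
    rw [pvPrefixLoop, pvLookup9, pv_startswith_eq_slice acc p (h (p, c) (by simp)),
        ih (fun q hq => h q (List.mem_cons_of_mem _ hq))]

-- pvLookup9 returns none when no table key equals the head
theorem pv_lookup9_none (l : List (String × String)) (head : String)
    (h : ∀ q ∈ l, q.1 ≠ head) : pvLookup9 l head = none := by
  induction l with
  | nil => rfl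
  | cons q rest ih =>
    obtain ⟨p, c⟩ := q
    rw [pvLookup9, if_neg, ih (fun q hq => h q (List.mem_cons_of_mem _ hq))]
    simpa using h (p, c) (by simp)

-- the core: on heads of length ≤ 9, A's table lookup IS B's arithmetic decoder
-- table facts used by the none-branches
theorem pv_table_fact : ∀ q ∈ pvTable, q.1 = "NC_012920" ∨
    (q.1.toList.take 7 = "NC_0000".toList ∧ q.1.toList.length = 9 ∧
     (q.1.toList.drop 7).all PySem.Chars.isdigit = true) := by decide

theorem pv_eq_ofList (s : String) (l : List Char) (h : s.toList = l) : s = String.ofList l := by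
  apply String.toList_injective; rw [h, String.toList_ofList]

theorem pv_digit_mem (c : Char) (h : PySem.Chars.isdigit c = true) :
    c ∈ ['0','1','2','3','4','5','6','7','8','9'] := by
  simp [PySem.Chars.isdigit] at h
  obtain ⟨h1, h2⟩ := h
  have b1 : 48 ≤ c.toNat := h1
  have b2 : c.toNat ≤ 57 := h2
  have := Char.ofNat_toNat c
  interval_cases h3 : c.toNat <;> rw [← this] <;> decide

theorem pv_lookup_eq_decode (head : String) :
    pvLookup9 pvTable head = pvDecodeAccession head := by
  by_cases hM : head = "NC_012920"
  · subst hM; decide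
  · by_cases hc : head.toList.take 7 = "NC_0000".toList ∧ head.toList.length = 9
    · obtain ⟨h7, h9⟩ := hc
      obtain ⟨a, b, hab⟩ := List.length_eq_two.mp
        (show (head.toList.drop 7).length = 2 by simp [h9])
      have hfull : head.toList = ['N','C','_','0','0','0','0',a,b] := by
        have h := List.take_append_drop 7 head.toList
        rw [h7, hab] at h
        exact h.symm
      by_cases hdig : PySem.Chars.isdigit a = true ∧ PySem.Chars.isdigit b = true
      · obtain ⟨ha, hb⟩ := hdig
        rw [pv_eq_ofList head _ hfull]
        have ha' := pv_digit_mem a ha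
        have hb' := pv_digit_mem b hb
        fin_cases ha' <;> fin_cases hb' <;> decide
      · have hdrop : head.toList.drop 7 = [a, b] := hab
        rw [pv_lookup9_none pvTable head ?_, pvDecodeAccession,
            if_neg (by simp [hM]), if_neg ?_]
        · intro hcond
          simp only [Bool.and_eq_true] at hcond
          have hdg := hcond.2
          rw [PySem.Str.strIsdigit_eq, PySem.Str.toList_slice,
              PySem.Chars.slice_eq_listSlice,
              PySem.List.slice_from head.toList (by norm_num : (0:Int) ≤ 7)] at hdg
          rw [show ((7:Int).toNat) = 7 from rfl, hdrop] at hdg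
          simp [PySem.Chars.strIsdigit] at hdg
          exact hdig ⟨hdg.1, hdg.2⟩
        · intro q hq he
          rcases pv_table_fact q hq with h | h
          · exact hM ((he ▸ h : head = "NC_012920"))
          · have hall : (head.toList.drop 7).all PySem.Chars.isdigit = true := he ▸ h.2.2
            rw [hdrop] at hall
            simp at hall
            exact hdig ⟨hall.1, hall.2⟩
    · rw [pv_lookup9_none pvTable head ?_, pvDecodeAccession,
          if_neg (by simp [hM]), if_neg ?_]
      · intro hcond
        simp only [Bool.and_eq_true, beq_iff_eq] at hcond
        obtain ⟨⟨hlen9, hsw⟩, _⟩ := hcond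
        rw [PySem.Str.len_eq] at hlen9
        have h9 : head.toList.length = 9 := by exact_mod_cast hlen9
        rw [PySem.Str.startswith_eq] at hsw
        have hpre := (PySem.Chars.startswith_iff _ _).mp hsw
        have h7 := List.prefix_iff_eq_take.mp hpre
        exact hc ⟨h7.symm, h9⟩
      · intro q hq he
        rcases pv_table_fact q hq with h | h
        · exact hM ((he ▸ h : head = "NC_012920"))
        · exact hc ⟨he ▸ h.1, he ▸ h.2.1⟩


theorem pv_main (acc : String) :
    pvPrefixLoop pvTable acc = pvDecodeAccession (PySem.Str.slice acc none (some 9)) := by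
  rw [pv_loop_eq_lookup acc pvTable (by decide), pv_lookup_eq_decode]

-- ===== VERDICT (by name: the statement is the Claim_ definition above) =====
theorem extract_chromosome_from_hgvs_py_spec : Claim_equal_extract_chromosome_from_hgvs_py := by
  intro hgvs_value _
  unfold Spec_extract_chromosome_from_hgvs_py
  unfold extract_chromosome_from_hgvs_py extract_chromosome_from_hgvs_py_alt
  simp only [pv_main]
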